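-- pv_equiv track=rewrite | github.com/mikepsinn/disease-eradication-plan | tools/fix-validation-errors.py | comment_placeholder_links
-- ===== SOURCE A (Python) =====
-- changes_made = []
--
-- def comment_placeholder_links(content: str, filepath: str) -> str:
--     """Comment out placeholder links like {Record URL}"""
--     lines = content.split('\n')
--     modified = False
--
--     for i, line in enumerate(lines):
--         if '{Record URL}' in line:
--             # Comment out the line
--             if not line.strip().startswith('<!--'):
--                 lines[i] = f'<!-- {line} -->'
--                 modified = True
--
--     if modified:
--         content = '\n'.join(lines)
--         changes_made.append(f"{filepath}: Commented out placeholder {{Record URL}}")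
--
--     return content
-- ===== SOURCE B (Python) =====
-- changes_made = []
--
-- def _fix(line):
--     """Wrap a finished line in an HTML comment if it carries the placeholder."""
--     if '{Record URL}' in line and not line.strip().startswith('<!--'):
--         return f'<!-- {line} -->', True
--     return line, False
--
-- def comment_placeholder_links(content: str, filepath: str) -> str:
--     """Comment out placeholder links like {Record URL} (single streaming pass)."""
--     out = []
--     buf = []
--     modified = False
--     for ch in content:
--         if ch == '\n':
--             line, m = _fix(''.join(buf))
--             out.append(line)
--             out.append('\n')
--             modified = modified or m
--             buf = []
--         else:
--             buf.append(ch)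
--     line, m = _fix(''.join(buf))
--     out.append(line)
--     modified = modified or m
--     if modified:
--         changes_made.append(f"{filepath}: Commented out placeholder {{Record URL}}")
--     return ''.join(out)
-- ===== Notes on version B (the rewrite author's own statement) =====
-- stated objective: alternative
-- what changed: Replaces split-into-a-list / enumerate-with-in-place-index-mutation / conditional re-join with a single streaming pass over the characters that buffers the current line and emits each line (wrapped or not) as soon as its newline is seen.
import Mathlib
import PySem

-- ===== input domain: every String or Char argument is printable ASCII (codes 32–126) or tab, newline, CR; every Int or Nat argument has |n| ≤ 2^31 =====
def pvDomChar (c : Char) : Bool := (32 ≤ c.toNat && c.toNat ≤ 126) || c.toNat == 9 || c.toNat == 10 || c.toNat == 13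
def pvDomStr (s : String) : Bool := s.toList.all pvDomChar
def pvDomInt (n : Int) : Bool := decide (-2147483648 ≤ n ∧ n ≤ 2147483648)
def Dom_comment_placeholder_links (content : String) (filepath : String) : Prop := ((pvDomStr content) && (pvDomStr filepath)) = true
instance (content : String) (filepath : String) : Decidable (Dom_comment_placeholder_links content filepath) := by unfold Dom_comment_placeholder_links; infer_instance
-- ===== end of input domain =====

-- B replaces A's split/enumerate/in-place-mutate/join over a list of lines by a single streaming pass over
-- the characters (objective: alternative). Both Pythons append the same note to the module-level
-- `changes_made` under the same condition; the equivalence proved here is about the RETURN value.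

-- ===== PORT A =====
def comment_placeholder_links (content : String) (filepath : String) : String :=
  let lines := PySem.Chars.splitOn content.toList ['\n']   -- content.split('\n')
  -- 'for i, line in enumerate(lines)' with 'lines[i] = …': step i reads the live list at index i
  -- (only indices < i have been replaced), so it is ported as a fold over the indices.
  let st := (List.range lines.length).foldl
    (fun (st : List (List Char) × Bool) i =>
      let line := st.1.getD i []
      if PySem.Chars.isIn "{Record URL}".toList line then
        if !PySem.Chars.startswith (PySem.Chars.strip line) "<!--".toList then
          (st.1.set i ("<!-- ".toList ++ line ++ " -->".toList), true)
        else st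
      else st)
    (lines, false)
  if st.2 then String.ofList (PySem.Chars.join ['\n'] st.1) else content

-- ===== PORT B =====
-- helper _fix of Source B: wrap a finished line if it carries the placeholder
def pvFixLine (line : List Char) : List Char × Bool :=
  if PySem.Chars.isIn "{Record URL}".toList line &&
     !PySem.Chars.startswith (PySem.Chars.strip line) "<!--".toList then
    ("<!-- ".toList ++ line ++ " -->".toList, true)
  else (line, false)

-- single pass over the characters; state = (emitted output, current line buffer, modified flag)
def comment_placeholder_links_alt (content : String) (filepath : String) : String :=
  let st := content.toList.foldl
    (fun (st : List Char × List Char × Bool) ch =>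
      if ch = '\n' then
        let fl := pvFixLine st.2.1
        (st.1 ++ fl.1 ++ ['\n'], [], st.2.2 || fl.2)
      else
        (st.1, st.2.1 ++ [ch], st.2.2))
    ([], [], false)
  let fl := pvFixLine st.2.1
  String.ofList (st.1 ++ fl.1)

-- ===== PRECONDITION & SPEC =====
def Spec_comment_placeholder_links (content : String) (filepath : String) (out : String) : Prop := out = comment_placeholder_links_alt content filepath
instance (content : String) (filepath : String) (out : String) : Decidable (Spec_comment_placeholder_links content filepath out) := by unfold Spec_comment_placeholder_links; infer_instance

-- ===== CLAIM (what is proved, stated in full; the proofs are below) =====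
def Claim_equal_comment_placeholder_links : Prop := ∀ (content : String) (filepath : String), Dom_comment_placeholder_links content filepath → Spec_comment_placeholder_links content filepath (comment_placeholder_links content filepath)

-- ===== LEMMAS AND PROOFS =====

def pvLines : List Char → List (List Char)
  | [] => [[]]
  | c :: t =>
    if c = '\n' then [] :: pvLines t
    else match pvLines t with
      | [] => [[c]]
      | h :: ts => (c :: h) :: ts

theorem pvLines_ne_nil (cs : List Char) : pvLines cs ≠ [] := by
  cases cs with
  | nil => simp [pvLines]
  | cons c t =>
    simp only [pvLines]
    split
    · simp
    · split <;> simp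

theorem pvLines_no_nl (buf : List Char) (h : '\n' ∉ buf) : pvLines buf = [buf] := by
  induction buf with
  | nil => rfl
  | cons c t ih =>
    simp only [List.mem_cons, not_or] at h
    simp only [pvLines, if_neg (Ne.symm h.1), ih h.2]

theorem pvLines_append_nl (buf cs : List Char) (h : '\n' ∉ buf) :
    pvLines (buf ++ '\n' :: cs) = buf :: pvLines cs := by
  induction buf with
  | nil => simp [pvLines]
  | cons c t ih =>
    simp only [List.mem_cons, not_or] at h
    simp only [List.cons_append, pvLines, if_neg (Ne.symm h.1), ih h.2]

theorem pv_join_pvLines (cs : List Char) : PySem.Chars.join ['\n'] (pvLines cs) = cs := by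
  induction cs with
  | nil => simp [pvLines, PySem.Chars.join_singleton]
  | cons c t ih =>
    by_cases hc : c = '\n'
    · subst hc
      rw [show pvLines ('\n'::t) = [] :: pvLines t from by simp [pvLines]]
      cases h : pvLines t with
      | nil => exact absurd h (pvLines_ne_nil t)
      | cons q rest =>
        rw [h] at ih
        rw [PySem.Chars.join_cons_cons, ← ih]
        simp
    · simp only [pvLines, if_neg hc]
      cases h : pvLines t with
      | nil => exact absurd h (pvLines_ne_nil t)
      | cons q rest =>
        rw [h] at ih
        cases rest with
        | nil =>
          simp [PySem.Chars.join_singleton] at ih ⊢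
          simp [ih]
        | cons r rs =>
          rw [PySem.Chars.join_cons_cons] at ih
          rw [PySem.Chars.join_cons_cons, ← ih]
          simp

def pvConsH (x : List Char) : List (List Char) → List (List Char)
  | [] => [x]
  | h :: ts => (x ++ h) :: ts

theorem pv_go_spec (fuel : Nat) (l cur : List Char) (acc : List (List Char))
    (h : l.length < fuel) :
    PySem.Chars.splitOn.go ['\n'] fuel l cur acc = acc.reverse ++ pvConsH cur.reverse (pvLines l) := by
  induction fuel generalizing l cur acc with
  | zero => omega
  | succ n ih =>
    cases l with
    | nil =>
      simp [PySem.Chars.splitOn.go, pvLines, pvConsH]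
    | cons c rest =>
      rw [PySem.Chars.splitOn.go]
      by_cases hc : c = '\n'
      · subst hc
        rw [if_pos (by simp [List.isPrefixOf])]
        rw [ih _ _ _ (by simpa using Nat.lt_of_succ_lt_succ h)]
        cases hq : pvLines rest with
        | nil => exact absurd hq (pvLines_ne_nil rest)
        | cons q ts => simp [pvConsH, pvLines, hq]
      · rw [if_neg (by simp [List.isPrefixOf, Ne.symm hc])]
        rw [ih _ _ _ (by simpa using Nat.lt_of_succ_lt_succ h)]
        cases hq : pvLines rest with
        | nil => exact absurd hq (pvLines_ne_nil rest)
        | cons q ts => simp [pvConsH, pvLines, hc, hq]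

theorem pv_splitOn_eq (cs : List Char) : PySem.Chars.splitOn cs ['\n'] = pvLines cs := by
  rw [PySem.Chars.splitOn, pv_go_spec _ _ _ _ (by omega)]
  cases h : pvLines cs with
  | nil => exact absurd h (pvLines_ne_nil cs)
  | cons q ts => simp [pvConsH]

theorem pv_foldB (cs : List Char) (out buf : List Char) (m : Bool) (h : '\n' ∉ buf) :
    (cs.foldl
        (fun (st : List Char × List Char × Bool) ch =>
          if ch = '\n' then
            (st.1 ++ (pvFixLine st.2.1).1 ++ ['\n'], [], st.2.2 || (pvFixLine st.2.1).2)
          else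
            (st.1, st.2.1 ++ [ch], st.2.2))
        (out, buf, m)).1
    ++ (pvFixLine (cs.foldl
        (fun (st : List Char × List Char × Bool) ch =>
          if ch = '\n' then
            (st.1 ++ (pvFixLine st.2.1).1 ++ ['\n'], [], st.2.2 || (pvFixLine st.2.1).2)
          else
            (st.1, st.2.1 ++ [ch], st.2.2))
        (out, buf, m)).2.1).1
    = out ++ PySem.Chars.join ['\n'] ((pvLines (buf ++ cs)).map (fun l => (pvFixLine l).1)) := by
  induction cs generalizing out buf m with
  | nil =>
    simp only [List.foldl_nil, List.append_nil, pvLines_no_nl buf h, List.map_cons, List.map_nil,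
      PySem.Chars.join_singleton]
  | cons c t ih =>
    by_cases hc : c = '\n'
    · subst hc
      simp only [List.foldl_cons]
      rw [if_pos trivial]
      rw [ih _ [] _ (by simp)]
      rw [pvLines_append_nl buf t h]
      cases hq : pvLines t with
      | nil => exact absurd hq (pvLines_ne_nil t)
      | cons q ts =>
        simp only [hq, List.map_cons, PySem.Chars.join_cons_cons]
        simp
        rw [hq, List.map_cons]
    · simp only [List.foldl_cons]
      rw [if_neg hc]
      rw [ih _ (buf ++ [c]) _ (by simp [h, Ne.symm hc])]
      simp

theorem pv_foldA (lines : List (List Char)) (b : Bool) (n : Nat) (hn : n ≤ lines.length) :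
    (List.range n).foldl
      (fun (st : List (List Char) × Bool) i =>
        let line := st.1.getD i []
        if PySem.Chars.isIn "{Record URL}".toList line then
          if !PySem.Chars.startswith (PySem.Chars.strip line) "<!--".toList then
            (st.1.set i ("<!-- ".toList ++ line ++ " -->".toList), true)
          else st
        else st)
      (lines, b)
    = ((lines.take n).map (fun l => (pvFixLine l).1) ++ lines.drop n,
       b || (lines.take n).any (fun l => (pvFixLine l).2)) := by
  induction n with
  | zero => simp
  | succ k ih =>
    rw [List.range_succ, List.foldl_append, ih (by omega)]
    have hk : k < lines.length := by omega
    have hlen : ((lines.take k).map (fun l => (pvFixLine l).1)).length = k := by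
      simp [List.length_take, Nat.min_eq_left (by omega : k ≤ lines.length)]
    have hget : (((lines.take k).map (fun l => (pvFixLine l).1) ++ lines.drop k).getD k []) = lines[k] := by
      rw [List.getD_eq_getElem?_getD, List.getElem?_append_right (by omega), hlen]
      simp [List.getElem?_drop, hk]
    have hdrop : lines.drop k = lines[k] :: lines.drop (k+1) := List.drop_eq_getElem_cons hk
    have htake : lines.take (k+1) = lines.take k ++ [lines[k]] := by
      rw [List.take_succ]; simp [List.getElem?_eq_getElem hk]
    simp only [List.foldl_cons, List.foldl_nil]
    show (let line := ((lines.take k).map (fun l => (pvFixLine l).1) ++ lines.drop k).getD k []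
      if PySem.Chars.isIn "{Record URL}".toList line then
        if !PySem.Chars.startswith (PySem.Chars.strip line) "<!--".toList then
          (((lines.take k).map (fun l => (pvFixLine l).1) ++ lines.drop k).set k
            ("<!-- ".toList ++ line ++ " -->".toList), true)
        else ((lines.take k).map (fun l => (pvFixLine l).1) ++ lines.drop k,
              b || (lines.take k).any (fun l => (pvFixLine l).2))
      else ((lines.take k).map (fun l => (pvFixLine l).1) ++ lines.drop k,
            b || (lines.take k).any (fun l => (pvFixLine l).2))) = _
    simp only [hget]
    rw [htake]
    simp only [List.map_append, List.map_cons, List.map_nil, List.any_append, List.any_cons,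
      List.any_nil]
    by_cases h1 : PySem.Chars.isIn "{Record URL}".toList (lines[k]) = true
    · by_cases h2 : PySem.Chars.startswith (PySem.Chars.strip lines[k]) "<!--".toList = true
      · have hfix : pvFixLine lines[k] = (lines[k], false) := by
          unfold pvFixLine; simp only [h1, h2]; simp
        rw [if_pos h1, if_neg (by simp only [h2]; simp)]
        rw [hdrop]
        simp [hfix]
      · have h2' : PySem.Chars.startswith (PySem.Chars.strip lines[k]) "<!--".toList = false :=
          eq_false_of_ne_true h2
        have hfix : pvFixLine lines[k] = ("<!-- ".toList ++ lines[k] ++ " -->".toList, true) := by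
          unfold pvFixLine; simp only [h1, h2']; simp
        rw [if_pos h1, if_pos (by simp only [h2']; simp)]
        rw [List.set_append_right _ _ (by omega), hlen]
        conv_lhs => rw [hdrop]
        simp only [Nat.sub_self, List.set_cons_zero]
        simp [hfix]
    · have h1' : PySem.Chars.isIn "{Record URL}".toList (lines[k]) = false := eq_false_of_ne_true h1
      have hfix : pvFixLine lines[k] = (lines[k], false) := by
        unfold pvFixLine; simp only [h1']; simp
      rw [if_neg (by simp only [h1']; simp)]
      rw [hdrop]
      simp [hfix]

theorem pvFix_of_flag_false (l : List Char) (h : (pvFixLine l).2 = false) : (pvFixLine l).1 = l := by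
  unfold pvFixLine at h ⊢
  split at h
  · simp at h
  · next hc => rw [if_neg hc]

theorem pv_main (content filepath : String) :
    comment_placeholder_links content filepath = comment_placeholder_links_alt content filepath := by
  have hB : comment_placeholder_links_alt content filepath
      = String.ofList (PySem.Chars.join ['\n']
          ((pvLines content.toList).map (fun l => (pvFixLine l).1))) := by
    have e : comment_placeholder_links_alt content filepath
        = String.ofList ((content.toList.foldl
            (fun (st : List Char × List Char × Bool) ch =>
              if ch = '\n' then
                (st.1 ++ (pvFixLine st.2.1).1 ++ ['\n'], [], st.2.2 || (pvFixLine st.2.1).2)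
              else
                (st.1, st.2.1 ++ [ch], st.2.2))
            ([], [], false)).1
          ++ (pvFixLine (content.toList.foldl
            (fun (st : List Char × List Char × Bool) ch =>
              if ch = '\n' then
                (st.1 ++ (pvFixLine st.2.1).1 ++ ['\n'], [], st.2.2 || (pvFixLine st.2.1).2)
              else
                (st.1, st.2.1 ++ [ch], st.2.2))
            ([], [], false)).2.1).1) := rfl
    rw [e, pv_foldB content.toList [] [] false (by simp)]
    simp
  have eA : comment_placeholder_links content filepath
      = (if ((List.range (pvLines content.toList).length).foldl
          (fun (st : List (List Char) × Bool) i =>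
            let line := st.1.getD i []
            if PySem.Chars.isIn "{Record URL}".toList line then
              if !PySem.Chars.startswith (PySem.Chars.strip line) "<!--".toList then
                (st.1.set i ("<!-- ".toList ++ line ++ " -->".toList), true)
              else st
            else st)
          (pvLines content.toList, false)).2 then
        String.ofList (PySem.Chars.join ['\n']
          ((List.range (pvLines content.toList).length).foldl
          (fun (st : List (List Char) × Bool) i =>
            let line := st.1.getD i []
            if PySem.Chars.isIn "{Record URL}".toList line then
              if !PySem.Chars.startswith (PySem.Chars.strip line) "<!--".toList then
                (st.1.set i ("<!-- ".toList ++ line ++ " -->".toList), true)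
              else st
            else st)
          (pvLines content.toList, false)).1) else content) := by
    unfold comment_placeholder_links
    rw [pv_splitOn_eq]
  rw [eA, pv_foldA (pvLines content.toList) false (pvLines content.toList).length le_rfl]
  simp only [List.take_length, List.drop_length, List.append_nil, Bool.false_or]
  by_cases hany : (pvLines content.toList).any (fun l => (pvFixLine l).2) = true
  · rw [if_pos hany, hB]
  · rw [if_neg hany, hB]
    have hall : ∀ l ∈ pvLines content.toList, (pvFixLine l).1 = l := by
      intro l hl
      exact pvFix_of_flag_false l
        (eq_false_of_ne_true ((List.any_eq_false.mp (eq_false_of_ne_true hany)) l hl))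
    rw [List.map_congr_left hall, List.map_id', pv_join_pvLines]
    simp

-- ===== VERDICT (by name: the statement is the Claim_ definition above) =====
theorem comment_placeholder_links_spec : Claim_equal_comment_placeholder_links := by
  intro content filepath _
  unfold Spec_comment_placeholder_links
  exact pv_main content filepath
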